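-- pv_equiv track=rewrite | github.com/Thewildweb/attribute_parser | src/funcs.py | get_tokens_near_index
-- ===== SOURCE A (Python) =====
-- from collections.abc import Iterator
--
-- def get_tokens_near_index(
--     tokens, index: int, distance: int = 1, before: bool = True, after: bool = True
-- ) -> Iterator[str]:
--     """Get tokens near index"""
--     # get the section before the index and reverse it
--     tokens_before_index = tokens[:index]
--     tokens_after_index = tokens[index + 1 :]
--
--     for _ in range(distance):
--         if before and tokens_before_index:
--             yield tokens_before_index.pop()
--
--         if after and tokens_after_index:
--             yield tokens_after_index.pop(0)
--
--         if not tokens_before_index and not tokens_after_index: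
--             break
-- ===== SOURCE B (Python) =====
-- def _interleave(xs, ys):
--     out = []
--     for x, y in zip(xs, ys):
--         out.append(x)
--         out.append(y)
--     k = min(len(xs), len(ys))
--     out.extend(xs[k:])
--     out.extend(ys[k:])
--     return out
--
-- def get_tokens_near_index(tokens, index, distance=1, before=True, after=True):
--     """Get tokens near index"""
--     d = max(distance, 0)
--     before_seq = list(reversed(tokens[:index]))[:d] if before else []
--     after_seq = tokens[index + 1:][:d] if after else []
--     yield from _interleave(before_seq, after_seq)
-- ===== Notes on version B (the rewrite author's own statement) =====
-- stated objective: simpler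
-- what changed: Replaces the mutable two-queue pop()/pop(0)/break loop with precomputed slices (reversed prefix and suffix, each truncated to distance) interleaved in one structural pass with no mutable queue state.
import Mathlib
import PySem

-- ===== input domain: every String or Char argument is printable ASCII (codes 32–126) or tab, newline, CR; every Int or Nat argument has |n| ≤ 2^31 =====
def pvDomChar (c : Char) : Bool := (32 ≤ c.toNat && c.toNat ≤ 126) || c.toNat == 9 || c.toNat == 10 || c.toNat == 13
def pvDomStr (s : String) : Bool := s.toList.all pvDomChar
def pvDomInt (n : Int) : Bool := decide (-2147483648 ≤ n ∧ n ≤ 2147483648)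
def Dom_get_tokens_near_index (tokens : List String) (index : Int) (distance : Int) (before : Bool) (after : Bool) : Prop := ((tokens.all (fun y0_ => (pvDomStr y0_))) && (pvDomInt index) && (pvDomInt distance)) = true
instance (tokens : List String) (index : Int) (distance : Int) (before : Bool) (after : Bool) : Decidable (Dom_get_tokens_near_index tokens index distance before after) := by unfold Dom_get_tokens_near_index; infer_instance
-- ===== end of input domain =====

-- B replaces A's mutable two-queue pop/pop(0)/break loop by slicing both candidate
-- sequences up front and interleaving them in one structural pass (objective: simpler).
-- A is a generator; its yielded sequence is ported as the returned List String.

-- ===== PORT A =====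
-- the body of `for _ in range(distance)` with the two queues as state; pop() = last
-- element, pop(0) = head, and the `break` when both queues are empty
def pvALoop (before after : Bool) : List String → List String → Nat → List String
  | _, _, 0 => []
  | bef, aft, n+1 =>
    let s1 : List String × List String :=
      if before then
        match bef.getLast? with
        | some x => ([x], bef.dropLast)
        | none => ([], bef)
      else ([], bef)
    let s2 : List String × List String :=
      if after then
        match aft with
        | y :: rest => ([y], rest)
        | [] => ([], aft)
      else ([], aft)
    s1.1 ++ s2.1 ++ (if s1.2.isEmpty && s2.2.isEmpty then [] else pvALoop before after s1.2 s2.2 n)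

def get_tokens_near_index (tokens : List String) (index : Int) (distance : Int) (before : Bool) (after : Bool) : List String :=
  let tokens_before_index := PySem.List.slice tokens none (some index)
  let tokens_after_index := PySem.List.slice tokens (some (index + 1)) none
  -- range(distance) performs distance.toNat iterations
  pvALoop before after tokens_before_index tokens_after_index distance.toNat

-- ===== PORT B =====
-- _interleave: one pass over zip(xs, ys), then the unmatched tails
def pvInterleave (xs ys : List String) : List String :=
  let out := (xs.zip ys).foldl (fun acc p => acc ++ [p.1, p.2]) []
  let k := min xs.length ys.length
  out ++ xs.drop k ++ ys.drop k

def get_tokens_near_index_alt (tokens : List String) (index : Int) (distance : Int) (before : Bool) (after : Bool) : List String :=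
  let d := (max distance 0).toNat   -- d = max(distance, 0); [:d] with d ≥ 0 is take d
  let before_seq := if before then ((PySem.List.slice tokens none (some index)).reverse).take d else []
  let after_seq := if after then (PySem.List.slice tokens (some (index + 1)) none).take d else []
  pvInterleave before_seq after_seq

-- ===== PRECONDITION & SPEC =====
def Spec_get_tokens_near_index (tokens : List String) (index : Int) (distance : Int) (before : Bool) (after : Bool) (out : List String) : Prop := out = get_tokens_near_index_alt tokens index distance before after
instance (tokens : List String) (index : Int) (distance : Int) (before : Bool) (after : Bool) (out : List String) : Decidable (Spec_get_tokens_near_index tokens index distance before after out) := by unfold Spec_get_tokens_near_index; infer_instance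

-- ===== CLAIM (what is proved, stated in full; the proofs are below) =====
def Claim_equal_get_tokens_near_index : Prop := ∀ (tokens : List String) (index : Int) (distance : Int) (before : Bool) (after : Bool), Dom_get_tokens_near_index tokens index distance before after → Spec_get_tokens_near_index tokens index distance before after (get_tokens_near_index tokens index distance before after)

-- ===== LEMMAS AND PROOFS =====

-- proof-side structural view of the interleaving
def pvMerge : List String → List String → List String
  | [], ys => ys
  | x :: xs, [] => x :: xs
  | x :: xs, y :: ys => x :: y :: pvMerge xs ys

theorem pvInterleave_eq_pvMerge (xs ys : List String) :
    pvInterleave xs ys = pvMerge xs ys := by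
  induction xs generalizing ys with
  | nil => cases ys <;> simp [pvInterleave, pvMerge]
  | cons x xs ih =>
    cases ys with
    | nil => simp [pvInterleave, pvMerge]
    | cons y ys =>
      have h := ih ys
      simp only [pvInterleave, PySem.List.foldl_append_eq_flatMap, List.nil_append,
        List.append_assoc] at h ⊢
      simp [pvMerge, h]

theorem pvMerge_nil_right (xs : List String) : pvMerge xs [] = xs := by
  cases xs <;> rfl

theorem pvALoop_ff (bef aft : List String) (n : Nat) :
    pvALoop false false bef aft n = [] := by
  induction n generalizing bef aft with
  | zero => rfl
  | succ n ih => simp [pvALoop, ih]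

theorem pvALoop_tf_nil (aft : List String) (n : Nat) :
    pvALoop true false [] aft n = [] := by
  induction n generalizing aft with
  | zero => rfl
  | succ n ih => simp [pvALoop, ih]

theorem pvALoop_tf (r aft : List String) (n : Nat) :
    pvALoop true false r.reverse aft n = r.take n := by
  induction n generalizing r aft with
  | zero => simp [pvALoop]
  | succ n ih =>
    cases r with
    | nil => simpa using pvALoop_tf_nil aft (n+1)
    | cons x rs =>
      simp only [pvALoop, List.reverse_cons, List.getLast?_concat, List.dropLast_concat,
        if_true]
      simp [ih rs aft]
      intro h1 _
      exact Or.inr h1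

theorem pvALoop_ft_nil (bef : List String) (n : Nat) :
    pvALoop false true bef [] n = [] := by
  induction n generalizing bef with
  | zero => rfl
  | succ n ih => simp [pvALoop, ih]

theorem pvALoop_ft (bef aft : List String) (n : Nat) :
    pvALoop false true bef aft n = aft.take n := by
  induction n generalizing bef aft with
  | zero => simp [pvALoop]
  | succ n ih =>
    cases aft with
    | nil => simpa using pvALoop_ft_nil bef (n+1)
    | cons y ys =>
      simp only [pvALoop, if_false, Bool.false_eq_true]
      simp [ih bef ys]
      intro _ h2
      exact Or.inr h2

theorem pvALoop_tt (r aft : List String) (n : Nat) :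
    pvALoop true true r.reverse aft n = pvMerge (r.take n) (aft.take n) := by
  induction n generalizing r aft with
  | zero => simp [pvALoop, pvMerge]
  | succ n ih =>
    cases r with
    | nil =>
      cases aft with
      | nil => simp [pvALoop, pvMerge]
      | cons y ys =>
        have h0 := ih [] ys
        simp only [List.reverse_nil] at h0
        simp only [List.reverse_nil, pvALoop, List.getLast?_nil, if_true]
        simp [h0, pvMerge]
        intro h2
        exact Or.inr h2
    | cons x rs =>
      cases aft with
      | nil =>
        have h0 := ih rs []
        simp only [List.reverse_cons, pvALoop, List.getLast?_concat, List.dropLast_concat,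
          if_true]
        simp [h0, pvMerge_nil_right]
        intro h1
        exact Or.inr h1
      | cons y ys =>
        simp only [List.reverse_cons, pvALoop, List.getLast?_concat, List.dropLast_concat,
          if_true]
        simp [ih rs ys, pvMerge]
        intro h1 h2
        simp [h1, h2, pvMerge]

-- ===== VERDICT (by name: the statement is the Claim_ definition above) =====
theorem get_tokens_near_index_spec : Claim_equal_get_tokens_near_index := by
  intro tokens index distance before after _
  unfold Spec_get_tokens_near_index get_tokens_near_index get_tokens_near_index_alt
  have hd : (max distance 0).toNat = distance.toNat := by omega
  have htf := pvALoop_tf (PySem.List.slice tokens none (some index)).reverse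
      (PySem.List.slice tokens (some (index + 1)) none) distance.toNat
  have htt := pvALoop_tt (PySem.List.slice tokens none (some index)).reverse
      (PySem.List.slice tokens (some (index + 1)) none) distance.toNat
  rw [List.reverse_reverse] at htf htt
  simp only [pvInterleave_eq_pvMerge]
  cases before <;> cases after <;>
    simp [hd, pvALoop_ff, pvALoop_ft, htf, htt, pvMerge, pvMerge_nil_right]
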